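-- pv_equiv track=rewrite | github.com/Anon11110/Util-Scripts | run_cts_batch/split_tests.py | split_tests_into_subgroups
-- ===== SOURCE A (Python) =====
-- from typing import Dict, List
--
-- def get_prefix(line: str, dot_count: int) -> str:
--     """Get prefix up to the nth dot."""
--     parts = line.split('.')
--     return '.'.join(parts[:dot_count])
--
-- def count_tests_with_prefix(tests: List[str], prefix: str) -> int:
--     """Count how many tests start with the given prefix."""
--     return sum(1 for test in tests if test.startswith(prefix + '.'))
--
-- def split_tests_into_subgroups(tests: List[str], threshold: int) -> Dict[str, int]:
--     """
--     Split tests into subgroups based on prefix, ensuring each subgroup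
--     has less than or equal to threshold tests.
--
--     Args:
--         tests: List of test names
--         threshold: Maximum number of tests per subgroup
--
--     Returns:
--         Dictionary mapping prefix to test count
--     """
--     subgroups = {}
--     processed = set()
--
--     for test in tests:
--         # Skip if this test already belongs to a processed subgroup
--         if any(test.startswith(prefix + '.') for prefix in processed):
--             continue
--
--         # Start from 4 dots (after dEQP-VK.ray_tracing_pipeline.acceleration_structures)
--         # Try increasing number of dots until we find a subgroup small enough
--         found = False
--
--         for dot_count in range(4, test.count('.') + 2):
--             prefix = get_prefix(test, dot_count)
--
--             # Skip if already processed
--             if prefix in processed: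
--                 found = True
--                 break
--
--             # Count tests with this prefix
--             count = count_tests_with_prefix(tests, prefix)
--
--             if count <= threshold:
--                 # This prefix has acceptable number of tests
--                 subgroups[prefix] = count
--                 processed.add(prefix)
--                 found = True
--                 break
--
--         # If we couldn't find a small enough subgroup, use the full test name
--         if not found:
--             subgroups[test] = 1
--             processed.add(test)
--
--     return subgroups
-- ===== SOURCE B (Python) =====
-- def split_tests_into_subgroups(tests, threshold):
--     """
--     Staged re-implementation: (1) build a prefix->count index in one pass,
--     (2) compute each test's candidate (prefix, count) purely from the index,
--     (3) one fold over the candidate list that skips covered tests and emits.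
--     """
--     # counts[p] = number of tests starting with p + '.' (duplicates counted)
--     counts = {}
--     for t in tests:
--         parts = t.split('.')
--         for k in range(1, len(parts)):
--             p = '.'.join(parts[:k])
--             counts[p] = counts.get(p, 0) + 1
--
--     def candidate(t):
--         parts = t.split('.')
--         for k in range(4, len(parts) + 1):
--             p = '.'.join(parts[:k])
--             c = counts.get(p, 0)
--             if c <= threshold:
--                 return (p, c)
--         return (t, 1)
--
--     cands = [(t, candidate(t)) for t in tests]
--
--     out = {}
--     active = set()
--     for t, (p, c) in cands:
--         parts = t.split('.')
--         if any('.'.join(parts[:k]) in active for k in range(1, len(parts))):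
--             continue
--         out[p] = c
--         active.add(p)
--     return out
-- ===== Notes on version B (the rewrite author's own statement) =====
-- stated objective: faster
-- what changed: B is restaged into three passes: a prefix->count index built once over all dot-boundary prefixes, a stateless per-test candidate (prefix, count) computed from the index alone, and a single covering fold over the precomputed candidate list - so A's per-candidate rescan of the whole test list and its scan over the processed set both disappear, and the subgroup search no longer interleaves with the output state.
import Mathlib
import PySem

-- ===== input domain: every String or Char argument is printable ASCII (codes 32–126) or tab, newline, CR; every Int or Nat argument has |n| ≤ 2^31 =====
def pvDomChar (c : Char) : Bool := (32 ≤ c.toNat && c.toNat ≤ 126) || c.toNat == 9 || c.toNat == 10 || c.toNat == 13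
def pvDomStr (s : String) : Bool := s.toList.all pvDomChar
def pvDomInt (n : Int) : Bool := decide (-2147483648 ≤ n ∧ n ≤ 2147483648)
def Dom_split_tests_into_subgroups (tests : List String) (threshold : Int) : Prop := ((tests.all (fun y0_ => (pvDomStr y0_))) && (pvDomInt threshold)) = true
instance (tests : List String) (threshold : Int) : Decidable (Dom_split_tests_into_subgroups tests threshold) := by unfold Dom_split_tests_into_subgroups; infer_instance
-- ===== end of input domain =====

-- B restages the computation: a prefix→count index built in one pass, a pure per-test
-- candidate computed from the index alone (no processed-set state in the search), and one
-- final covering fold over the precomputed candidate list; objective: faster.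

-- ===== PORT A =====
-- line.split('.') : no Str-level splitOn exists; Chars.splitOn (the sep ≠ "" split) on toList, back to String
def pySplitDot (line : String) : List String :=
  (PySem.Chars.splitOn line.toList ['.']).map String.ofList

def get_prefix (line : String) (dot_count : Int) : String :=
  let parts := pySplitDot line
  PySem.Str.join "." (PySem.List.slice parts none (some dot_count))

def count_tests_with_prefix (tests : List String) (pfx : String) : Int :=
  ((tests.countP (fun test => PySem.Str.startswith test (pfx ++ "."))) : Int)

-- the inner 'for dot_count in range(…): … break' loop; [] = loop ended with found = False
def goA (tests : List String) (threshold : Int) (test : String)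
    (subgroups : PySem.Dict String Int) (processed : PySem.Set String) :
    List Int → PySem.Dict String Int × PySem.Set String
  | [] => (subgroups.insert test 1, processed.add test)
  | dot_count :: rest =>
    let pfx := get_prefix test dot_count
    if processed.contains pfx then (subgroups, processed)
    else
      let count := count_tests_with_prefix tests pfx
      if count ≤ threshold then (subgroups.insert pfx count, processed.add pfx)
      else goA tests threshold test subgroups processed rest

def split_tests_into_subgroups (tests : List String) (threshold : Int) : List (String × Int) :=
  -- any(… for prefix in processed) is an existence test, independent of the set's order
  (tests.foldl (fun st test =>
      if st.2.any (fun pfx => PySem.Str.startswith test (pfx ++ ".")) then st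
      else goA tests threshold test st.1 st.2
             (PySem.List.pyRange 4 ((PySem.Str.count test "." : Int) + 2))
    ) ((PySem.Dict.empty : PySem.Dict String Int), (PySem.Set.empty : PySem.Set String))).1.items

-- ===== PORT B =====
-- '.'.join(parts[:k])
def altPrefix (parts : List String) (k : Int) : String :=
  PySem.Str.join "." (PySem.List.slice parts none (some k))

-- stage 1: counts[p] = counts.get(p, 0) + 1 over every dot-boundary prefix of every test
def altCounts (tests : List String) : PySem.Dict String Int :=
  tests.foldl (fun d t =>
    let parts := pySplitDot t
    (PySem.List.pyRange 1 (parts.length : Int)).foldl (fun d k =>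
      let p := altPrefix parts k
      d.insert p (d.getD p 0 + 1)) d) PySem.Dict.empty

-- stage 2: candidate(t) — the 'for k … return' loop of Source B, stateless
def altCand (counts : PySem.Dict String Int) (threshold : Int) (t : String)
    (parts : List String) : List Int → String × Int
  | [] => (t, 1)
  | k :: rest =>
    let p := altPrefix parts k
    let c := counts.getD p 0
    if c ≤ threshold then (p, c) else altCand counts threshold t parts rest

-- stage 3: the covering fold over the candidate list
def split_tests_into_subgroups_alt (tests : List String) (threshold : Int) : List (String × Int) :=
  let counts := altCounts tests
  let cands := tests.map (fun t =>
    (t, altCand counts threshold t (pySplitDot t)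
          (PySem.List.pyRange 4 (((pySplitDot t).length : Int) + 1))))
  (cands.foldl (fun st tc =>
      let parts := pySplitDot tc.1
      if (PySem.List.pyRange 1 (parts.length : Int)).any
           (fun k => st.2.contains (altPrefix parts k)) then st
      else (st.1.insert tc.2.1 tc.2.2, st.2.add tc.2.1)
    ) ((PySem.Dict.empty : PySem.Dict String Int), (PySem.Set.empty : PySem.Set String))).1.items

-- ===== PRECONDITION & SPEC =====
def Spec_split_tests_into_subgroups (tests : List String) (threshold : Int) (out : List (String × Int)) : Prop := out = split_tests_into_subgroups_alt tests threshold
instance (tests : List String) (threshold : Int) (out : List (String × Int)) : Decidable (Spec_split_tests_into_subgroups tests threshold out) := by unfold Spec_split_tests_into_subgroups; infer_instance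

-- ===== CLAIM (what is proved, stated in full; the proofs are below) =====
def Claim_equal_split_tests_into_subgroups : Prop := ∀ (tests : List String) (threshold : Int), Dom_split_tests_into_subgroups tests threshold → Spec_split_tests_into_subgroups tests threshold (split_tests_into_subgroups tests threshold)

-- ===== LEMMAS AND PROOFS =====

def consHead (x : List Char) : List (List Char) → List (List Char)
  | [] => [x]
  | h :: t => (x ++ h) :: t

def mySplit : List Char → List (List Char)
  | [] => [[]]
  | a :: as => if a = '.' then [] :: mySplit as else consHead [a] (mySplit as)

theorem mySplit_ne_nil (l : List Char) : mySplit l ≠ [] := by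
  cases l with
  | nil => simp [mySplit]
  | cons a as =>
    simp only [mySplit]
    split
    · simp
    · cases h : mySplit as <;> simp [consHead]

theorem go_spec (fuel : Nat) : ∀ (l cur : List Char) (acc : List (List Char)), l.length ≤ fuel →
    PySem.Chars.splitOn.go ['.'] fuel l cur acc = acc.reverse ++ consHead cur.reverse (mySplit l) := by
  induction fuel with
  | zero =>
    intro l cur acc h
    have : l = [] := by cases l <;> simp_all
    subst this
    rw [PySem.Chars.splitOn.go]
    simp [mySplit, consHead]
  | succ n ih =>
    intro l cur acc h
    cases l with
    | nil =>
      rw [PySem.Chars.splitOn.go]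
      all_goals first | omega | simp [mySplit, consHead]
    | cons c rest =>
      rw [PySem.Chars.splitOn.go]
      simp only [List.isPrefixOf, Bool.and_true, beq_iff_eq]
      by_cases hc : ('.' : Char) = c
      · subst hc
        rw [if_pos rfl, ih _ _ _ (by simpa using Nat.le_of_succ_le_succ h)]
        show _ ++ consHead [].reverse (mySplit (List.drop 1 ('.' :: rest))) = _
        simp [mySplit, consHead]
        cases hm : mySplit rest with
        | nil => exact absurd hm (mySplit_ne_nil rest)
        | cons mh mt => rfl
      · rw [if_neg hc, ih _ _ _ (by simpa using Nat.le_of_succ_le_succ h)]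
        have hc' : ¬ c = '.' := fun e => hc e.symm
        simp only [mySplit, hc', ite_false]
        cases hm : mySplit rest with
        | nil => exact absurd hm (mySplit_ne_nil rest)
        | cons mh mt => simp [consHead]

theorem splitOn_eq_mySplit (l : List Char) : PySem.Chars.splitOn l ['.'] = mySplit l := by
  show PySem.Chars.splitOn.go ['.'] (l.length + 1) l [] [] = _
  rw [go_spec (l.length + 1) l [] [] (by omega)]
  cases hm : mySplit l with
  | nil => exact absurd hm (mySplit_ne_nil l)
  | cons mh mt => simp [consHead]

theorem count_go_spec (fuel : Nat) : ∀ (l : List Char) (acc : Nat), l.length ≤ fuel →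
    PySem.Chars.count.go ['.'] fuel l acc = acc + l.countP (· == '.') := by
  induction fuel with
  | zero =>
    intro l acc h
    have : l = [] := by cases l <;> simp_all
    subst this
    rw [PySem.Chars.count.go]; simp
  | succ n ih =>
    intro l acc h
    cases l with
    | nil =>
      rw [PySem.Chars.count.go]
      all_goals first | omega | simp
    | cons c rest =>
      rw [PySem.Chars.count.go]
      all_goals first | omega | simp only [List.isPrefixOf, Bool.and_true, beq_iff_eq]
      by_cases hc : ('.' : Char) = c
      · subst hc
        rw [if_pos rfl, ih _ _ (by simpa using Nat.le_of_succ_le_succ h)]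
        simp only [List.countP_cons]
        simp
        omega
      · rw [if_neg hc, ih _ _ (by simpa using Nat.le_of_succ_le_succ h)]
        have hc' : ¬ c = '.' := fun e => hc e.symm
        simp [hc']

theorem count_dot_eq (l : List Char) : PySem.Chars.count l ['.'] = l.countP (· == '.') := by
  show (if (['.'] : List Char).isEmpty then l.length + 1 else PySem.Chars.count.go ['.'] l.length l 0) = _
  simp [count_go_spec l.length l 0 le_rfl]

theorem length_mySplit (l : List Char) : (mySplit l).length = l.countP (· == '.') + 1 := by
  induction l with
  | nil => simp [mySplit]
  | cons a as ih =>
    simp only [mySplit, List.countP_cons]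
    by_cases hc : a = '.'
    · simp [hc, ih]
    · simp only [hc, ite_false]
      cases hm : mySplit as with
      | nil => exact absurd hm (mySplit_ne_nil as)
      | cons mh mt => simp [consHead, hc]; rw [hm] at ih; simp at ih; omega

theorem join_cons_cases (x : List Char) (tl : List (List Char)) :
    PySem.Chars.join ['.'] (x :: tl) = x ++ (match tl with | [] => [] | y :: t => '.' :: PySem.Chars.join ['.'] (y :: t)) := by
  cases tl with
  | nil => simp [PySem.Chars.join_singleton]
  | cons y t => rw [PySem.Chars.join_cons_cons]; simp

theorem join_cons_head_cons (a : Char) (h : List Char) (tl : List (List Char)) :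
    PySem.Chars.join ['.'] ((a :: h) :: tl) = a :: PySem.Chars.join ['.'] (h :: tl) := by
  rw [join_cons_cases, join_cons_cases]; rfl

theorem join_take_F (a : Char) (h : List Char) (tl : List (List Char)) (k : Nat) (hk : 1 ≤ k) :
    PySem.Chars.join ['.'] (((a :: h) :: tl).take k) = a :: PySem.Chars.join ['.'] ((h :: tl).take k) := by
  obtain ⟨j, rfl⟩ : ∃ j, k = j + 1 := ⟨k - 1, by omega⟩
  simp only [List.take_succ_cons]
  exact join_cons_head_cons a h (tl.take j)

theorem take_mySplit_ne_nil (as : List Char) (j : Nat) (hj : 1 ≤ j) :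
    (mySplit as).take j ≠ [] := by
  simp only [ne_eq, List.take_eq_nil_iff, not_or]
  exact ⟨by omega, mySplit_ne_nil as⟩

theorem join_cons_take (as : List Char) (j : Nat) (hj : 1 ≤ j) :
    PySem.Chars.join ['.'] ([] :: (mySplit as).take j) = '.' :: PySem.Chars.join ['.'] ((mySplit as).take j) := by
  obtain ⟨m, mt, hm⟩ := List.exists_cons_of_ne_nil (take_mySplit_ne_nil as j hj)
  rw [hm, PySem.Chars.join_cons_cons]
  simp

theorem keyChars : ∀ (t p : List Char),
    ((p ++ ['.']) <+: t) ↔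
      ∃ k : Nat, 1 ≤ k ∧ k < (mySplit t).length ∧ PySem.Chars.join ['.'] ((mySplit t).take k) = p := by
  intro t
  induction t with
  | nil =>
    intro p
    constructor
    · rintro ⟨r, hr⟩; exact absurd hr (by simp)
    · rintro ⟨k, h1, h2, -⟩; simp [mySplit] at h2; omega
  | cons a as ih =>
    intro p
    have hpos : 1 ≤ (mySplit as).length := List.length_pos_iff.mpr (mySplit_ne_nil as)
    by_cases ha : a = '.'
    · subst ha
      have hS : mySplit ('.' :: as) = [] :: mySplit as := by simp [mySplit]
      rw [hS]
      cases p with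
      | nil =>
        simp only [List.nil_append, List.length_cons]
        constructor
        · intro _
          exact ⟨1, le_rfl, by omega, by simp [PySem.Chars.join_singleton]⟩
        · intro _
          exact ⟨as, rfl⟩
      | cons b p' =>
        rw [List.cons_append, List.cons_prefix_cons]
        constructor
        · rintro ⟨rfl, hpre⟩
          obtain ⟨j, hj1, hj2, hj3⟩ := (ih p').mp hpre
          refine ⟨j + 1, by omega, by simp; omega, ?_⟩
          rw [List.take_succ_cons, join_cons_take as j hj1, hj3]
        · rintro ⟨k, hk1, hk2, hk3⟩
          obtain ⟨j, rfl⟩ : ∃ j, k = j + 1 := ⟨k - 1, by omega⟩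
          rw [List.take_succ_cons] at hk3
          by_cases hj0 : j = 0
          · subst hj0; simp [PySem.Chars.join_singleton] at hk3
          · rw [join_cons_take as j (by omega)] at hk3
            obtain ⟨hb, hk3'⟩ := List.cons_eq_cons.mp hk3
            subst hb
            exact ⟨rfl, (ih p').mpr ⟨j, by omega, by simp at hk2; omega, hk3'⟩⟩
    · obtain ⟨h, tl, hS⟩ := List.exists_cons_of_ne_nil (mySplit_ne_nil as)
      have hT : mySplit (a :: as) = (a :: h) :: tl := by simp [mySplit, ha, hS, consHead]
      rw [hT]
      have hlen : ((a :: h) :: tl).length = (mySplit as).length := by rw [hS]; simp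
      cases p with
      | nil =>
        simp only [List.nil_append]
        constructor
        · rw [List.cons_prefix_cons]
          rintro ⟨h1, -⟩
          exact absurd h1.symm ha
        · rintro ⟨k, hk1, hk2, hk3⟩
          rw [join_take_F a h tl k hk1] at hk3
          exact absurd hk3 (by simp)
      | cons b p' =>
        rw [List.cons_append, List.cons_prefix_cons]
        constructor
        · rintro ⟨hb, hpre⟩
          subst hb
          obtain ⟨j, hj1, hj2, hj3⟩ := (ih p').mp hpre
          refine ⟨j, hj1, by omega, ?_⟩
          rw [join_take_F b h tl j hj1]
          rw [hS] at hj3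
          rw [hj3]
        · rintro ⟨k, hk1, hk2, hk3⟩
          rw [join_take_F a h tl k hk1] at hk3
          obtain ⟨hb, hk3'⟩ := List.cons_eq_cons.mp hk3
          subst hb
          exact ⟨rfl, (ih p').mpr ⟨k, hk1, by omega, by rw [hS]; exact hk3'⟩⟩

theorem join_snoc (xs : List (List Char)) (y : List Char) (hxs : xs ≠ []) :
    PySem.Chars.join ['.'] (xs ++ [y]) = PySem.Chars.join ['.'] xs ++ '.' :: y := by
  induction xs with
  | nil => exact absurd rfl hxs
  | cons x t ih =>
    cases t with
    | nil => rw [List.cons_append, List.nil_append, PySem.Chars.join_cons_cons, PySem.Chars.join_singleton, PySem.Chars.join_singleton]; simp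
    | cons z zs =>
      rw [show (x :: z :: zs) ++ [y] = x :: ((z :: zs) ++ [y]) from rfl]
      rw [show (z :: zs) ++ [y] = z :: (zs ++ [y]) from rfl, PySem.Chars.join_cons_cons]
      rw [show z :: (zs ++ [y]) = (z :: zs) ++ [y] from rfl, ih (by simp), PySem.Chars.join_cons_cons]
      simp

theorem jlen_succ (S : List (List Char)) (k : Nat) (h1 : 1 ≤ k) (h2 : k < S.length) :
    (PySem.Chars.join ['.'] (S.take k)).length < (PySem.Chars.join ['.'] (S.take (k+1))).length := by
  have ht : S.take (k+1) = S.take k ++ [S[k]] := by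
    rw [List.take_add_one]
    simp [List.getElem?_eq_getElem h2]
  have hne : S.take k ≠ [] := by
    simp only [ne_eq, List.take_eq_nil_iff, not_or]
    exact ⟨by omega, fun e => by subst e; simp at h2⟩
  rw [ht, join_snoc _ _ hne]
  simp

theorem jlen_mono (S : List (List Char)) (k k' : Nat) (h1 : 1 ≤ k) (hkk : k < k') (h2 : k' < S.length) :
    (PySem.Chars.join ['.'] (S.take k)).length < (PySem.Chars.join ['.'] (S.take k')).length := by
  induction k' with
  | zero => omega
  | succ m ih =>
    by_cases hm : k = m
    · subst hm; exact jlen_succ S k h1 (by omega)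
    · exact lt_trans (ih (by omega) (by omega)) (jlen_succ S m (by omega) (by omega))

theorem pySplitDot_eq (t : String) : pySplitDot t = (mySplit t.toList).map String.ofList := by
  simp [pySplitDot, splitOn_eq_mySplit]

theorem length_pySplitDot (t : String) : (pySplitDot t).length = (mySplit t.toList).length := by
  rw [pySplitDot_eq]; simp

theorem altPrefix_toList (t : String) (k : Int) (hk : 0 ≤ k) :
    (altPrefix (pySplitDot t) k).toList
      = PySem.Chars.join ['.'] ((mySplit t.toList).take k.toNat) := by
  simp only [altPrefix, PySem.List.slice_to _ hk, PySem.Str.toList_join, pySplitDot_eq]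
  rw [← List.map_take, List.map_map]
  have : String.toList ∘ String.ofList = id := funext (fun l => show (String.ofList l).toList = l from String.toList_ofList)
  rw [this, List.map_id]
  rfl

theorem strKEY (t p : String) :
    PySem.Str.startswith t (p ++ ".") = true ↔
      ∃ k, k ∈ PySem.List.pyRange 1 (((pySplitDot t).length : Int))
        ∧ altPrefix (pySplitDot t) k = p := by
  have h1 : PySem.Str.startswith t (p ++ ".") = PySem.Chars.startswith t.toList (p.toList ++ ['.']) := by
    have : (p ++ ".").toList = p.toList ++ ['.'] := by rw [String.toList_append]; rfl
    simp [PySem.Str.startswith, this]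
  rw [h1, PySem.Chars.startswith_iff, keyChars]
  constructor
  · rintro ⟨k, hk1, hk2, hk3⟩
    refine ⟨(k : Int), ?_, ?_⟩
    · rw [PySem.List.mem_pyRange_one]
      constructor
      · exact_mod_cast hk1
      · rw [length_pySplitDot]; exact_mod_cast hk2
    · apply String.toList_inj.mp
      rw [altPrefix_toList t (k : Int) (by positivity)]
      simpa using hk3
  · rintro ⟨k, hk1, hk3⟩
    rw [PySem.List.mem_pyRange_one, length_pySplitDot] at hk1
    refine ⟨k.toNat, by omega, by omega, ?_⟩
    rw [← altPrefix_toList t k (by omega), hk3]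

theorem nodup_altPrefixes (t : String) :
    (((PySem.List.pyRange 1 (((pySplitDot t).length : Int))).map
        (altPrefix (pySplitDot t)))).Nodup := by
  apply List.Nodup.map_on ?_ (PySem.List.nodup_pyRange_one _ _)
  intro x hx y hy hxy
  rw [PySem.List.mem_pyRange_one, length_pySplitDot] at hx hy
  by_contra hne
  have hlen : (altPrefix (pySplitDot t) x).toList.length ≠ (altPrefix (pySplitDot t) y).toList.length := by
    rw [altPrefix_toList t x (by omega), altPrefix_toList t y (by omega)]
    rcases lt_or_gt_of_ne hne with h | h
    · exact Nat.ne_of_lt (jlen_mono _ x.toNat y.toNat (by omega) (by omega) (by omega))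
    · exact Nat.ne_of_gt (jlen_mono _ y.toNat x.toNat (by omega) (by omega) (by omega))
  exact hlen (by rw [hxy])

theorem count_altPrefixes (t p : String) :
    (((PySem.List.pyRange 1 (((pySplitDot t).length : Int))).map
        (altPrefix (pySplitDot t)))).count p
      = if PySem.Str.startswith t (p ++ ".") then 1 else 0 := by
  split_ifs with h
  · obtain ⟨k, hk1, hk2⟩ := (strKEY t p).mp h
    have hmem : p ∈ ((PySem.List.pyRange 1 (((pySplitDot t).length : Int))).map (altPrefix (pySplitDot t))) :=
      List.mem_map.mpr ⟨k, hk1, hk2⟩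
    exact List.count_eq_one_of_mem (nodup_altPrefixes t) hmem
  · rw [List.count_eq_zero]
    intro hmem
    obtain ⟨k, hk1, hk2⟩ := List.mem_map.mp hmem
    exact h ((strKEY t p).mpr ⟨k, hk1, hk2⟩)

theorem altCounts_aux (p : String) : ∀ (ts : List String) (d : PySem.Dict String Int),
    (ts.foldl (fun d t =>
      let parts := pySplitDot t
      (PySem.List.pyRange 1 (parts.length : Int)).foldl (fun d k =>
        let q := altPrefix parts k
        d.insert q (d.getD q 0 + 1)) d) d).getD p 0
    = d.getD p 0 + ((ts.countP (fun t => PySem.Str.startswith t (p ++ "."))) : Int) := by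
  intro ts
  induction ts with
  | nil => intro d; simp
  | cons t rest ih =>
    intro d
    rw [List.foldl_cons, ih]
    have hinner : ((PySem.List.pyRange 1 (((pySplitDot t).length : Int))).foldl (fun d k =>
        let q := altPrefix (pySplitDot t) k
        d.insert q (d.getD q 0 + 1)) d).getD p 0
        = d.getD p 0 + (if PySem.Str.startswith t (p ++ ".") then 1 else 0 : Int) := by
      rw [show ((PySem.List.pyRange 1 (((pySplitDot t).length : Int))).foldl (fun d k =>
          let q := altPrefix (pySplitDot t) k
          d.insert q (d.getD q 0 + 1)) d)
        = (((PySem.List.pyRange 1 (((pySplitDot t).length : Int))).map (altPrefix (pySplitDot t))).foldl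
            (fun d x => d.insert x (d.getD x 0 + 1)) d) from (List.foldl_map (f := altPrefix (pySplitDot t))
            (g := fun (d : PySem.Dict String Int) (x : String) => d.insert x (d.getD x 0 + 1))
            (l := PySem.List.pyRange 1 (((pySplitDot t).length : Int))) (init := d)).symm]
      rw [PySem.Dict.getD_foldl_insert_add_one, count_altPrefixes]
      split_ifs <;> simp
    rw [hinner, List.countP_cons]
    split_ifs with h
    all_goals simp
    all_goals ring_nf
    try omega

theorem altCounts_getD (tests : List String) (p : String) :
    (altCounts tests).getD p 0 = count_tests_with_prefix tests p := by
  have h := altCounts_aux p tests PySem.Dict.empty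
  simpa [altCounts, count_tests_with_prefix] using h

theorem range_bound_eq (t : String) :
    ((PySem.Str.count t "." : Int) + 2) = (((pySplitDot t).length : Int) + 1) := by
  have h1 : PySem.Str.count t "." = PySem.Chars.count t.toList ['.'] := rfl
  rw [h1, count_dot_eq, length_pySplitDot, length_mySplit]
  push_cast
  ring

theorem skip_eq (processed : PySem.Set String) (t : String) :
    processed.any (fun pfx => PySem.Str.startswith t (pfx ++ "."))
      = (PySem.List.pyRange 1 (((pySplitDot t).length : Int))).any
          (fun k => processed.contains (altPrefix (pySplitDot t) k)) := by
  rw [Bool.eq_iff_iff, List.any_eq_true, List.any_eq_true]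
  constructor
  · rintro ⟨pfx, hmem, hsw⟩
    obtain ⟨k, hk1, hk2⟩ := (strKEY t pfx).mp hsw
    exact ⟨k, hk1, by rw [PySem.Set.contains_eq_decide, hk2]; exact decide_eq_true hmem⟩
  · rintro ⟨k, hk1, hc⟩
    rw [PySem.Set.contains_eq_decide] at hc
    exact ⟨altPrefix (pySplitDot t) k, of_decide_eq_true hc, (strKEY t _).mpr ⟨k, hk1, rfl⟩⟩

-- the full-length prefix is the test itself: '.'.join(t.split('.')) == t
theorem join_mySplit (l : List Char) : PySem.Chars.join ['.'] (mySplit l) = l := by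
  induction l with
  | nil => simp [mySplit, PySem.Chars.join_singleton]
  | cons a as ih =>
    by_cases ha : a = '.'
    · subst ha
      have hS : mySplit ('.' :: as) = [] :: mySplit as := by simp [mySplit]
      rw [hS]
      obtain ⟨m, mt, hm⟩ := List.exists_cons_of_ne_nil (mySplit_ne_nil as)
      rw [hm, PySem.Chars.join_cons_cons, ← hm, ih]
      simp
    · obtain ⟨h, tl, hS⟩ := List.exists_cons_of_ne_nil (mySplit_ne_nil as)
      have hT : mySplit (a :: as) = (a :: h) :: tl := by simp [mySplit, ha, hS, consHead]
      rw [hT, join_cons_head_cons, ← hS, ih]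

theorem altPrefix_full (t : String) :
    altPrefix (pySplitDot t) (((pySplitDot t).length : Int)) = t := by
  apply String.toList_inj.mp
  rw [altPrefix_toList t _ (by positivity)]
  rw [length_pySplitDot]
  simp [List.take_length, join_mySplit]

-- overwriting an existing key with its current value is a no-op
theorem insert_same_noop (d : PySem.Dict String Int) (k : String) (v : Int)
    (hnd : d.keys.Nodup) (h : d.get? k = some v) : d.insert k v = d := by
  apply PySem.Dict.ext
  have hc : d.contains k = true := by rw [PySem.Dict.contains_eq_isSome_get?, h]; rfl
  rw [PySem.Dict.items_insert_of_contains d v hc]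
  have hid : ∀ p ∈ d.items, (if (p.1 == k) = true then (k, v) else p) = p := by
    intro p hp
    by_cases hpk : p.1 = k
    · obtain ⟨a, b⟩ := p
      simp only at hpk
      subst hpk
      have := PySem.Dict.get?_of_mem_items d hp hnd
      rw [h] at this
      simp [Option.some.injEq] at this
      simp [this]
    · simp [hpk]
  rw [List.map_congr_left hid]
  simp

-- invariant carried by the outer fold: every processed prefix of depth ≥ 4 is already
-- recorded in subgroups with exactly the value B's candidate would assign it
def InvA (tests : List String) (threshold : Int)
    (sg : PySem.Dict String Int) (pr : PySem.Set String) : Prop :=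
  sg.keys.Nodup ∧
  ∀ p, pr.contains p = true → 4 ≤ (pySplitDot p).length →
    sg.get? p = some (if count_tests_with_prefix tests p ≤ threshold
                      then count_tests_with_prefix tests p else 1)

-- every candidate is either a stop (count ≤ threshold) or the fallback with all counts > threshold
theorem altCand_spec (counts : PySem.Dict String Int) (threshold : Int) (t : String)
    (parts : List String) : ∀ ks,
    (altCand counts threshold t parts ks = (t, 1)
      ∧ ∀ k ∈ ks, ¬ (counts.getD (altPrefix parts k) 0 ≤ threshold))
    ∨ (∃ k ∈ ks, altCand counts threshold t parts ks
          = (altPrefix parts k, counts.getD (altPrefix parts k) 0)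
        ∧ counts.getD (altPrefix parts k) 0 ≤ threshold) := by
  intro ks
  induction ks with
  | nil => exact Or.inl ⟨rfl, by simp⟩
  | cons k rest ih =>
    by_cases hc : counts.getD (altPrefix parts k) 0 ≤ threshold
    · exact Or.inr ⟨k, by simp, by simp [altCand, hc], hc⟩
    · have hrw : altCand counts threshold t parts (k :: rest)
          = altCand counts threshold t parts rest := by simp [altCand, hc]
      rcases ih with ⟨h1, h2⟩ | ⟨j, hj1, hj2, hj3⟩
      · refine Or.inl ⟨hrw ▸ h1, ?_⟩
        intro j hj
        rcases List.mem_cons.mp hj with rfl | hj'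
        · exact hc
        · exact h2 j hj'
      · exact Or.inr ⟨j, List.mem_cons_of_mem _ hj1, hrw ▸ hj2, hj3⟩

-- A's inner search equals "insert B's candidate" under the invariant (no-op when already present)
theorem goA_step (tests : List String) (threshold : Int) (t : String)
    (sg : PySem.Dict String Int) (pr : PySem.Set String)
    (hInv : InvA tests threshold sg pr)
    (hskip : ∀ k ∈ PySem.List.pyRange 1 (((pySplitDot t).length : Int)),
        pr.contains (altPrefix (pySplitDot t) k) = false) :
    ∀ ks, (∀ k ∈ ks, 4 ≤ k ∧ k ≤ (((pySplitDot t).length : Int))) → ks.Pairwise (· < ·) →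
    goA tests threshold t sg pr ks
      = (sg.insert (altCand (altCounts tests) threshold t (pySplitDot t) ks).1
                   (altCand (altCounts tests) threshold t (pySplitDot t) ks).2,
         pr.add (altCand (altCounts tests) threshold t (pySplitDot t) ks).1) := by
  intro ks
  induction ks with
  | nil => intro _ _; rfl
  | cons k rest ih =>
    intro hb hp
    have hk4 : (4 : Int) ≤ k := (hb k (by simp)).1
    have hkle := (hb k (by simp)).2
    have hcnt : (altCounts tests).getD (altPrefix (pySplitDot t) k) 0
        = count_tests_with_prefix tests (altPrefix (pySplitDot t) k) := altCounts_getD tests _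
    by_cases hc : pr.contains (altPrefix (pySplitDot t) k) = true
    · have hklen : k = (((pySplitDot t).length : Int)) := by
        by_contra hne
        have hmem : k ∈ PySem.List.pyRange 1 (((pySplitDot t).length : Int)) :=
          PySem.List.mem_pyRange_one.mpr ⟨by omega, lt_of_le_of_ne hkle hne⟩
        rw [hskip k hmem] at hc
        exact Bool.noConfusion hc
      have hrest : rest = [] := by
        cases rest with
        | nil => rfl
        | cons r rs =>
          have hrb := (hb r (by simp)).2
          have hkr := (List.pairwise_cons.mp hp).1 r (by simp)
          omega
      subst hrest
      have hfull : altPrefix (pySplitDot t) k = t := by rw [hklen]; exact altPrefix_full t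
      have hmemt : t ∈ pr := (PySem.Set.contains_iff pr t).mp (by rw [← hfull]; exact hc)
      have h4 : 4 ≤ (pySplitDot t).length := by
        have : (4 : Int) ≤ ((pySplitDot t).length : Int) := hklen ▸ hk4
        exact_mod_cast this
      have hget := hInv.2 t ((PySem.Set.contains_iff pr t).mpr hmemt) h4
      have hLHS : goA tests threshold t sg pr [k] = (sg, pr) := by
        show (if pr.contains (get_prefix t k) = true then (sg, pr) else _) = (sg, pr)
        rw [show get_prefix t k = altPrefix (pySplitDot t) k from rfl, if_pos hc]
      rw [hLHS]
      show _ = ((sg.insert (altCand _ _ _ _ [k]).1 (altCand _ _ _ _ [k]).2), pr.add (altCand _ _ _ _ [k]).1)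
      by_cases hth : count_tests_with_prefix tests t ≤ threshold
      · have hcand : altCand (altCounts tests) threshold t (pySplitDot t) [k]
            = (t, count_tests_with_prefix tests t) := by
          simp only [altCand, hfull]
          rw [hfull] at hcnt
          simp [hcnt, hth]
        rw [hcand]
        rw [if_pos hth] at hget
        rw [insert_same_noop sg t _ hInv.1 hget, PySem.Set.add_of_mem hmemt]
      · have hcand : altCand (altCounts tests) threshold t (pySplitDot t) [k] = (t, 1) := by
          simp only [altCand, hfull]
          rw [hfull] at hcnt
          simp [hcnt, hth]
        rw [hcand]
        rw [if_neg hth] at hget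
        rw [insert_same_noop sg t 1 hInv.1 hget, PySem.Set.add_of_mem hmemt]
    · have hcf : pr.contains (altPrefix (pySplitDot t) k) = false := by
        cases hcb : pr.contains (altPrefix (pySplitDot t) k)
        · rfl
        · exact absurd hcb hc
      by_cases hth : count_tests_with_prefix tests (altPrefix (pySplitDot t) k) ≤ threshold
      · have hLHS : goA tests threshold t sg pr (k :: rest)
            = (sg.insert (altPrefix (pySplitDot t) k)
                 (count_tests_with_prefix tests (altPrefix (pySplitDot t) k)),
               pr.add (altPrefix (pySplitDot t) k)) := by
          show (if pr.contains (get_prefix t k) = true then _ else _) = _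
          rw [show get_prefix t k = altPrefix (pySplitDot t) k from rfl, hcf]
          simp only [Bool.false_eq_true, if_false]
          rw [if_pos hth]
        have hcand : altCand (altCounts tests) threshold t (pySplitDot t) (k :: rest)
            = (altPrefix (pySplitDot t) k, count_tests_with_prefix tests (altPrefix (pySplitDot t) k)) := by
          simp [altCand, hcnt, hth]
        rw [hLHS, hcand]
      · have hLHS : goA tests threshold t sg pr (k :: rest)
            = goA tests threshold t sg pr rest := by
          show (if pr.contains (get_prefix t k) = true then _ else _) = _
          rw [show get_prefix t k = altPrefix (pySplitDot t) k from rfl, hcf]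
          simp only [Bool.false_eq_true, if_false]
          rw [if_neg hth]
        have hcand : altCand (altCounts tests) threshold t (pySplitDot t) (k :: rest)
            = altCand (altCounts tests) threshold t (pySplitDot t) rest := by
          simp [altCand, hcnt, hth]
        rw [hLHS, hcand]
        exact ih (fun j hj => hb j (List.mem_cons_of_mem _ hj)) (List.pairwise_cons.mp hp).2

-- the value B's candidate carries is exactly the invariant's formula (for depth-≥4 keys)
theorem cand_value_formula (tests : List String) (threshold : Int) (t : String)
    (h4 : 4 ≤ (pySplitDot ((altCand (altCounts tests) threshold t (pySplitDot t)
        (PySem.List.pyRange 4 (((pySplitDot t).length : Int) + 1))).1)).length) :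
    (altCand (altCounts tests) threshold t (pySplitDot t)
        (PySem.List.pyRange 4 (((pySplitDot t).length : Int) + 1))).2
      = (if count_tests_with_prefix tests (altCand (altCounts tests) threshold t (pySplitDot t)
            (PySem.List.pyRange 4 (((pySplitDot t).length : Int) + 1))).1 ≤ threshold
         then count_tests_with_prefix tests (altCand (altCounts tests) threshold t (pySplitDot t)
            (PySem.List.pyRange 4 (((pySplitDot t).length : Int) + 1))).1 else 1) := by
  rcases altCand_spec (altCounts tests) threshold t (pySplitDot t)
      (PySem.List.pyRange 4 (((pySplitDot t).length : Int) + 1)) with ⟨hfb, hall⟩ | ⟨k, hk1, hk2, hk3⟩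
  · rw [hfb] at h4 ⊢
    have h4I : (4 : Int) ≤ ((pySplitDot t).length : Int) := by exact_mod_cast h4
    have hlenmem : (((pySplitDot t).length : Int)) ∈
        PySem.List.pyRange 4 (((pySplitDot t).length : Int) + 1) :=
      PySem.List.mem_pyRange_one.mpr ⟨h4I, by omega⟩
    have hgt := hall _ hlenmem
    rw [altPrefix_full t, altCounts_getD] at hgt
    simp only
    rw [if_neg hgt]
  · rw [hk2]
    simp only
    rw [altCounts_getD] at hk3 ⊢
    rw [if_pos hk3]

-- the invariant survives inserting B's candidate
theorem inv_preserved (tests : List String) (threshold : Int) (t : String)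
    (sg : PySem.Dict String Int) (pr : PySem.Set String)
    (hInv : InvA tests threshold sg pr) :
    InvA tests threshold
      (sg.insert (altCand (altCounts tests) threshold t (pySplitDot t)
          (PySem.List.pyRange 4 (((pySplitDot t).length : Int) + 1))).1
        (altCand (altCounts tests) threshold t (pySplitDot t)
          (PySem.List.pyRange 4 (((pySplitDot t).length : Int) + 1))).2)
      (pr.add (altCand (altCounts tests) threshold t (pySplitDot t)
          (PySem.List.pyRange 4 (((pySplitDot t).length : Int) + 1))).1) := by
  refine ⟨PySem.Dict.nodup_keys_insert _ _ _ hInv.1, ?_⟩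
  intro q hq h4q
  have hqmem : q ∈ pr.add (altCand (altCounts tests) threshold t (pySplitDot t)
      (PySem.List.pyRange 4 (((pySplitDot t).length : Int) + 1))).1 :=
    (PySem.Set.contains_iff _ q).mp hq
  by_cases hqp : q = (altCand (altCounts tests) threshold t (pySplitDot t)
      (PySem.List.pyRange 4 (((pySplitDot t).length : Int) + 1))).1
  · subst hqp
    rw [PySem.Dict.get?_insert_self, cand_value_formula tests threshold t h4q]
  · rcases (PySem.Set.mem_add pr _ q).mp hqmem with hqin | hqeq
    · rw [PySem.Dict.get?_insert_of_ne _ _ hqp]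
      exact hInv.2 q ((PySem.Set.contains_iff pr q).mpr hqin) h4q
    · exact absurd hqeq hqp

-- the two outer folds agree from any invariant state
theorem fold_eq (tests : List String) (threshold : Int) :
    ∀ (ts : List String) (sg : PySem.Dict String Int) (pr : PySem.Set String),
    InvA tests threshold sg pr →
    ts.foldl (fun st test =>
        if st.2.any (fun pfx => PySem.Str.startswith test (pfx ++ ".")) then st
        else goA tests threshold test st.1 st.2
               (PySem.List.pyRange 4 ((PySem.Str.count test "." : Int) + 2))) (sg, pr)
    = ts.foldl (fun st t =>
        if (PySem.List.pyRange 1 (((pySplitDot t).length : Int))).any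
             (fun k => st.2.contains (altPrefix (pySplitDot t) k)) then st
        else (st.1.insert (altCand (altCounts tests) threshold t (pySplitDot t)
                  (PySem.List.pyRange 4 (((pySplitDot t).length : Int) + 1))).1
                (altCand (altCounts tests) threshold t (pySplitDot t)
                  (PySem.List.pyRange 4 (((pySplitDot t).length : Int) + 1))).2,
              st.2.add (altCand (altCounts tests) threshold t (pySplitDot t)
                  (PySem.List.pyRange 4 (((pySplitDot t).length : Int) + 1))).1)) (sg, pr) := by
  intro ts
  induction ts with
  | nil => intro sg pr _; rfl
  | cons t rest ih =>
    intro sg pr hInv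
    rw [List.foldl_cons, List.foldl_cons]
    have hcond : (pr.any (fun pfx => PySem.Str.startswith t (pfx ++ ".")))
        = (PySem.List.pyRange 1 (((pySplitDot t).length : Int))).any
            (fun k => pr.contains (altPrefix (pySplitDot t) k)) := skip_eq pr t
    by_cases hs : (PySem.List.pyRange 1 (((pySplitDot t).length : Int))).any
        (fun k => pr.contains (altPrefix (pySplitDot t) k)) = true
    · simp only [hcond, hs, if_true]
      exact ih sg pr hInv
    · have hsf : (PySem.List.pyRange 1 (((pySplitDot t).length : Int))).any
          (fun k => pr.contains (altPrefix (pySplitDot t) k)) = false := by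
        cases hb : (PySem.List.pyRange 1 (((pySplitDot t).length : Int))).any
            (fun k => pr.contains (altPrefix (pySplitDot t) k))
        · rfl
        · exact absurd hb hs
      have hskip : ∀ k ∈ PySem.List.pyRange 1 (((pySplitDot t).length : Int)),
          pr.contains (altPrefix (pySplitDot t) k) = false := by
        intro k hk
        have := List.any_eq_false.mp hsf k hk
        cases hb : pr.contains (altPrefix (pySplitDot t) k)
        · rfl
        · exact absurd hb this
      simp only [hcond, hsf, Bool.false_eq_true, if_false]
      have hrange : (PySem.List.pyRange 4 ((PySem.Str.count t "." : Int) + 2))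
          = PySem.List.pyRange 4 (((pySplitDot t).length : Int) + 1) := by
        rw [range_bound_eq t]
      rw [hrange]
      rw [goA_step tests threshold t sg pr hInv hskip _
          (fun k hk => by
            have := PySem.List.mem_pyRange_one.mp hk
            exact ⟨this.1, by omega⟩)
          (PySem.List.pairwise_lt_pyRange_one 4 (((pySplitDot t).length : Int) + 1))]
      exact ih _ _ (inv_preserved tests threshold t sg pr hInv)

-- ===== VERDICT (by name: the statement is the Claim_ definition above) =====
theorem split_tests_into_subgroups_spec : Claim_equal_split_tests_into_subgroups := by
  intro tests threshold _
  unfold Spec_split_tests_into_subgroups split_tests_into_subgroups split_tests_into_subgroups_alt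
  apply congrArg (fun (r : PySem.Dict String Int × PySem.Set String) => r.1.items)
  rw [List.foldl_map]
  have hInv0 : InvA tests threshold PySem.Dict.empty PySem.Set.empty := by
    refine ⟨by simp, ?_⟩
    intro p hp _
    simp [PySem.Set.empty] at hp
  exact fold_eq tests threshold tests PySem.Dict.empty PySem.Set.empty hInv0
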